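-- pv_equiv track=rewrite | github.com/tim-forrer/python | N Queens Validator.py | row_check
-- ===== SOURCE A (Python) =====
-- def row_check(soln):
--     """Checking that the no queen shares a row number with another queen"""
--     row_check = []
--     for item in soln:
--         if item in row_check:
--             return False
--         else:
--             row_check.append(item)
--     return True
-- ===== SOURCE B (Python) =====
-- def row_check(soln):
--     """Checking that the no queen shares a row number with another queen"""
--     return len(set(soln)) == len(soln)
-- ===== Notes on version B (the rewrite author's own statement) =====
-- stated objective: simpler
-- what changed: Replaces the early-exit membership loop over a growing list with a single set build followed by a length comparison (duplicate-free iff the set is as long as the list).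
import Mathlib
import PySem

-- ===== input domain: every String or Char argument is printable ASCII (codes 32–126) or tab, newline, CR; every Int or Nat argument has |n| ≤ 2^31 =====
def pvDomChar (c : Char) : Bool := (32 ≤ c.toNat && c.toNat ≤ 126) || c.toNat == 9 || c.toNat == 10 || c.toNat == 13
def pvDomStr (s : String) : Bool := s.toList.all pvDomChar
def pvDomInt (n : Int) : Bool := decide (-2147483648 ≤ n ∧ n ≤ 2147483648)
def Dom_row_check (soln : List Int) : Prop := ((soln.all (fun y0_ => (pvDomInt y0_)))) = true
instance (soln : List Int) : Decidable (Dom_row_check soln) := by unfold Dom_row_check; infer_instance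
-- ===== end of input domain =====

-- B replaces A's early-exit membership loop with a set build plus a length comparison (objective: simpler).


-- ===== PORT A =====
-- the 'for item in soln' loop with the accumulator list 'row_check', early return False on a repeat
def rowCheckLoop (acc : List Int) : List Int → Bool
  | [] => true
  | item :: rest => if acc.contains item then false else rowCheckLoop (acc ++ [item]) rest

def row_check (soln : List Int) : Bool := rowCheckLoop [] soln

-- ===== PORT B =====
-- len(set(soln)) == len(soln)
def row_check_alt (soln : List Int) : Bool :=
  PySem.Set.len (PySem.Set.ofList soln) == soln.length

-- ===== PRECONDITION & SPEC =====
def Spec_row_check (soln : List Int) (out : Bool) : Prop := out = row_check_alt soln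
instance (soln : List Int) (out : Bool) : Decidable (Spec_row_check soln out) := by unfold Spec_row_check; infer_instance

-- ===== CLAIM (what is proved, stated in full; the proofs are below) =====
def Claim_equal_row_check : Prop := ∀ (soln : List Int), Dom_row_check soln → Spec_row_check soln (row_check soln)

-- ===== LEMMAS AND PROOFS =====
theorem rowCheckLoop_eq_decide (xs acc : List Int) (hacc : acc.Nodup) :
    rowCheckLoop acc xs = decide ((acc ++ xs).Nodup) := by
  induction xs generalizing acc with
  | nil => simp [rowCheckLoop, hacc]
  | cons x xs ih =>
    by_cases hx : x ∈ acc
    · have hnot : ¬ (acc ++ x :: xs).Nodup := by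
        intro h
        rw [List.nodup_append] at h
        exact h.2.2 x hx x (List.mem_cons_self ..) rfl
      simp [rowCheckLoop, hx, hnot]
    · have hacc' : (acc ++ [x]).Nodup := by
        rw [List.nodup_append]
        refine ⟨hacc, List.nodup_singleton x, ?_⟩
        intro a ha b hb hab
        exact hx ((List.mem_singleton.mp hb) ▸ hab ▸ ha)
      rw [rowCheckLoop, if_neg (by simpa using hx), ih _ hacc']
      simp

theorem len_ofList_iff (xs : List Int) : ((PySem.Set.ofList xs).length = xs.length) ↔ xs.Nodup := by
  induction xs with
  | nil => simp [PySem.Set.ofList]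
  | cons x xs ih =>
    rw [PySem.Set.ofList_cons]
    by_cases hx : x ∈ xs
    · have hm : x ∈ PySem.Set.ofList xs := (PySem.Set.mem_ofList xs x).mpr hx
      have hlt : ((PySem.Set.ofList xs).filter (fun y => !y == x)).length < (PySem.Set.ofList xs).length := by
        apply List.length_filter_lt_length_iff_exists.mpr
        exact ⟨x, hm, by simp⟩
      have hle := PySem.Set.length_ofList_le (xs := xs)
      simp [PySem.Set.discard, List.nodup_cons, hx]
      omega
    · have hd : PySem.Set.discard (PySem.Set.ofList xs) x = PySem.Set.ofList xs := by
        apply List.filter_eq_self.mpr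
        intro a ha
        simp [PySem.Set.mem_ofList] at ha
        simp
        exact fun h => hx (h ▸ ha)
      simp [hd, List.nodup_cons, hx, ih]

-- ===== VERDICT (by name: the statement is the Claim_ definition above) =====
theorem row_check_spec : Claim_equal_row_check := by
  intro soln _
  unfold Spec_row_check row_check row_check_alt
  rw [rowCheckLoop_eq_decide soln [] List.nodup_nil]
  simp only [List.nil_append, PySem.Set.len]
  rw [Bool.eq_iff_iff]
  simp [len_ofList_iff]
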